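-- pv_equiv track=rewrite | github.com/markped1/9jatalk | resolve_conflicts.py | resolve_conflicts_keep_head
-- ===== SOURCE A (Python) =====
-- def resolve_conflicts_keep_head(content):
--     """
--     Parse conflict blocks and keep only the HEAD side.
--     A conflict block looks like:
--         <<<<<<< HEAD
--         ... HEAD content ...
--         =======
--         ... OTHER content ...
--         >>>>>>> branch
--     """
--     result = []
--     lines = content.split('\n')
--     i = 0
--     while i < len(lines):
--         line = lines[i]
--         if line.startswith('<<<<<<< '):
--             # Start of conflict — collect HEAD side
--             head_lines = []
--             i += 1
--             while i < len(lines) and not lines[i].startswith('======='):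
--                 head_lines.append(lines[i])
--                 i += 1
--             # Skip past =======
--             i += 1
--             # Skip OTHER side until >>>>>>>
--             while i < len(lines) and not lines[i].startswith('>>>>>>> '):
--                 i += 1
--             # Skip >>>>>>> line
--             i += 1
--             result.extend(head_lines)
--         else:
--             result.append(line)
--             i += 1
--     return '\n'.join(result)
-- ===== SOURCE B (Python) =====
-- def resolve_conflicts_keep_head(content):
--     result = []
--     state = 'keep'
--     for line in content.split('\n'):
--         if state == 'keep':
--             if line.startswith('<<<<<<< '):
--                 state = 'head'
--             else:
--                 result.append(line)
--         elif state == 'head':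
--             if line.startswith('======='):
--                 state = 'other'
--             else:
--                 result.append(line)
--         else:
--             if line.startswith('>>>>>>> '):
--                 state = 'keep'
--     return '\n'.join(result)
-- ===== Notes on version B (the rewrite author's own statement) =====
-- stated objective: idiomatic
-- what changed: Replaced the index-driven while loop with two nested skip-loops and a separate head buffer by a single forward foldl over the lines carrying a keep/head/other state flag and one result list.
import Mathlib
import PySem

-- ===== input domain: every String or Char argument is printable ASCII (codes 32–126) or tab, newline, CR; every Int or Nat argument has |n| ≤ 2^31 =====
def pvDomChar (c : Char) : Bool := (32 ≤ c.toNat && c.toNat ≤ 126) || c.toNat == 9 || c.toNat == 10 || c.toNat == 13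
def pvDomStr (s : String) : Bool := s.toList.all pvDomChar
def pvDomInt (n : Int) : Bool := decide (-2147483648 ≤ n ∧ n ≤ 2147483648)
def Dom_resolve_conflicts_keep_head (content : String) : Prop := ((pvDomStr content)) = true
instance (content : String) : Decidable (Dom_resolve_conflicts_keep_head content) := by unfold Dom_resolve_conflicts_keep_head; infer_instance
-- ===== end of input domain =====

-- B replaces A's index-driven nested while loops and separate head buffer by one
-- foldl over the lines carrying a keep/head/other state flag (idiomatic; same cost).

-- ===== PORT A =====
-- inner 'while i < len(lines) and not lines[i].startswith('>>>>>>> '): i += 1' followed by 'i += 1':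
-- returns the lines after the skipped OTHER part (and after the '>>>>>>> ' line if found)
def pvSkipOther : List String → List String
  | [] => []
  | l :: rest => if PySem.Str.startswith l ">>>>>>> " then rest else pvSkipOther rest

-- inner 'while … not startswith('======='): head_lines.append' + skip '=======' + skip OTHER:
-- returns (head_lines, remaining lines the outer loop continues on)
def pvCollectHead : List String → List String × List String
  | [] => ([], [])
  | l :: rest =>
    if PySem.Str.startswith l "=======" then ([], pvSkipOther rest)
    else
      let p := pvCollectHead rest
      (l :: p.1, p.2)

theorem pvSkipOther_length_le (xs : List String) : (pvSkipOther xs).length ≤ xs.length := by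
  induction xs with
  | nil => simp [pvSkipOther]
  | cons l rest ih =>
    simp only [pvSkipOther]
    split
    · simp
    · simp; omega

theorem pvCollectHead_snd_length_le (xs : List String) : (pvCollectHead xs).2.length ≤ xs.length := by
  induction xs with
  | nil => simp [pvCollectHead]
  | cons l rest ih =>
    simp only [pvCollectHead]
    split
    · have := pvSkipOther_length_le rest; simp; omega
    · simp; omega

-- A's outer 'while i < len(lines)' as recursion over the remaining suffix of lines
def pvLoopA : List String → List String
  | [] => []
  | l :: rest =>
    if PySem.Str.startswith l "<<<<<<< " then
      (pvCollectHead rest).1 ++ pvLoopA (pvCollectHead rest).2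
    else l :: pvLoopA rest
termination_by xs => xs.length
decreasing_by
  · have := pvCollectHead_snd_length_le rest; simp; omega
  · simp

def resolve_conflicts_keep_head (content : String) : String :=
  PySem.Str.join "\n" (pvLoopA (((PySem.Str.split? content "\n").getD [])))

-- ===== PORT B =====
-- state flag: 0 = keep, 1 = head, 2 = other
def pvStepB (st : List String × Nat) (line : String) : List String × Nat :=
  if st.2 = 0 then
    if PySem.Str.startswith line "<<<<<<< " then (st.1, 1) else (st.1 ++ [line], 0)
  else if st.2 = 1 then
    if PySem.Str.startswith line "=======" then (st.1, 2) else (st.1 ++ [line], 1)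
  else
    if PySem.Str.startswith line ">>>>>>> " then (st.1, 0) else (st.1, 2)

def resolve_conflicts_keep_head_alt (content : String) : String :=
  PySem.Str.join "\n" ((((PySem.Str.split? content "\n").getD [])).foldl pvStepB ([], 0)).1

-- ===== PRECONDITION & SPEC =====
def Spec_resolve_conflicts_keep_head (content : String) (out : String) : Prop := out = resolve_conflicts_keep_head_alt content
instance (content : String) (out : String) : Decidable (Spec_resolve_conflicts_keep_head content out) := by unfold Spec_resolve_conflicts_keep_head; infer_instance

-- ===== CLAIM (what is proved, stated in full; the proofs are below) =====
def Claim_equal_resolve_conflicts_keep_head : Prop := ∀ (content : String), Dom_resolve_conflicts_keep_head content → Spec_resolve_conflicts_keep_head content (resolve_conflicts_keep_head content)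

-- ===== LEMMAS AND PROOFS =====

-- in state 2 the fold drops lines exactly until pvSkipOther's cut point, then is in state 0
theorem foldB_state2 (lines : List String) (res : List String) :
    (List.foldl pvStepB (res, 2) lines).1 = (List.foldl pvStepB (res, 0) (pvSkipOther lines)).1 := by
  induction lines generalizing res with
  | nil => simp [pvSkipOther]
  | cons l rest ih =>
    by_cases h : PySem.Str.startswith l ">>>>>>> " = true
    all_goals simp at h
    · simp [pvSkipOther, pvStepB, h]
    · simp [pvSkipOther, pvStepB, h, ih]

-- in state 1 the fold appends exactly pvCollectHead's head part, then continues in state 0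
theorem foldB_state1 (lines : List String) (res : List String) :
    (List.foldl pvStepB (res, 1) lines).1
      = (List.foldl pvStepB (res ++ (pvCollectHead lines).1, 0) (pvCollectHead lines).2).1 := by
  induction lines generalizing res with
  | nil => simp [pvCollectHead]
  | cons l rest ih =>
    by_cases h : PySem.Str.startswith l "=======" = true
    all_goals simp at h
    · simp [pvCollectHead, pvStepB, h, foldB_state2]
    · have hc : pvCollectHead (l :: rest) = (l :: (pvCollectHead rest).1, (pvCollectHead rest).2) := by
        simp [pvCollectHead, h]
      have step : pvStepB (res, 1) l = (res ++ [l], 1) := by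
        simp [pvStepB, h]
      rw [hc, List.foldl_cons, step, ih (res ++ [l])]
      simp [List.append_assoc]

-- in state 0 the fold computes exactly A's outer loop
theorem foldB_state0 (lines : List String) :
    ∀ res, (List.foldl pvStepB (res, 0) lines).1 = res ++ pvLoopA lines := by
  induction lines using pvLoopA.induct with
  | case1 => intro res; simp [pvLoopA]
  | case2 l rest h ih =>
    intro res
    simp at h
    have hla : pvLoopA (l :: rest) = (pvCollectHead rest).1 ++ pvLoopA (pvCollectHead rest).2 := by
      simp [pvLoopA, h]
    have step : pvStepB (res, 0) l = (res, 1) := by simp [pvStepB, h]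
    rw [hla, List.foldl_cons, step, foldB_state1, ih]
    simp [List.append_assoc]
  | case3 l rest h ih =>
    intro res
    simp at h
    have hla : pvLoopA (l :: rest) = l :: pvLoopA rest := by
      simp [pvLoopA, h]
    have step : pvStepB (res, 0) l = (res ++ [l], 0) := by simp [pvStepB, h]
    rw [hla, List.foldl_cons, step, ih]
    simp


-- ===== VERDICT (by name: the statement is the Claim_ definition above) =====
theorem resolve_conflicts_keep_head_spec : Claim_equal_resolve_conflicts_keep_head := by
  intro content _
  unfold Spec_resolve_conflicts_keep_head resolve_conflicts_keep_head resolve_conflicts_keep_head_alt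
  rw [foldB_state0]
  simp
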